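-- pv_equiv track=rewrite | github.com/kidonaru/TubeDTX | scripts/convert_to_midi.py | get_peak_frame_data
-- ===== SOURCE A (Python) =====
-- def _clamp(n, smallest, largest):
--     return sorted([smallest, n, largest])[1]
--
-- def get_peak_frame_data(frame_data, samples_num, frame_clip):
--     samples_indices = range(-(samples_num // 2), -(samples_num // 2) + samples_num)
--
--     # 上下のピッチでならす
--     tmp_frame_data = {}
--     for pitch, power in frame_data.items():
--         frames = [frame_data[pitch + i] if pitch + i in frame_data else 0 for i in samples_indices]
--         tmp_frame_data[pitch] = _clamp(max(frames), 0, 1) if frame_clip else max(frames)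
--
--     # ピークのみ抽出
--     peak_frame_data = {}
--     for pitch, power in tmp_frame_data.items():
--         frames = [tmp_frame_data[pitch + i] if pitch + i in tmp_frame_data else 0 for i in samples_indices]
--         peak_frame_data[pitch] = tmp_frame_data[pitch] if frames.count(power) == len(frames) else 0
--
--     return peak_frame_data
-- ===== SOURCE B (Python) =====
-- from bisect import bisect_left
--
-- def get_peak_frame_data(frame_data, samples_num, frame_clip):
--     if not frame_data:
--         return {}
--     lo = -(samples_num // 2)
--     hi = lo + samples_num
--     ks = sorted(frame_data)
--     vs = [frame_data[k] for k in ks]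
--     tmp = {}
--     for p in frame_data:
--         l = bisect_left(ks, p + lo)
--         r = bisect_left(ks, p + hi)
--         m = max(vs[l:r])
--         if r - l != samples_num:
--             m = max(m, 0)
--         tmp[p] = min(1, max(0, m)) if frame_clip else m
--     tvs = [tmp[k] for k in ks]
--     out = {}
--     for p in frame_data:
--         l = bisect_left(ks, p + lo)
--         r = bisect_left(ks, p + hi)
--         seg = tvs[l:r]
--         w = tmp[p]
--         out[p] = w if min(seg) == max(seg) and (r - l == samples_num or w == 0) else 0
--     return out
-- ===== Notes on version B (the rewrite author's own statement) =====
-- stated objective: faster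
-- what changed: B sorts the pitch keys once and, for each pitch, binary-searches (bisect_left) the window's key range and scans only the keys actually present (plus an implicit 0 when the window is not fully occupied), testing the peak condition via min==max on that segment, instead of A's probing the dict at every one of samples_num offsets per pitch and building/counting a full window list twice.
import Mathlib
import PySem

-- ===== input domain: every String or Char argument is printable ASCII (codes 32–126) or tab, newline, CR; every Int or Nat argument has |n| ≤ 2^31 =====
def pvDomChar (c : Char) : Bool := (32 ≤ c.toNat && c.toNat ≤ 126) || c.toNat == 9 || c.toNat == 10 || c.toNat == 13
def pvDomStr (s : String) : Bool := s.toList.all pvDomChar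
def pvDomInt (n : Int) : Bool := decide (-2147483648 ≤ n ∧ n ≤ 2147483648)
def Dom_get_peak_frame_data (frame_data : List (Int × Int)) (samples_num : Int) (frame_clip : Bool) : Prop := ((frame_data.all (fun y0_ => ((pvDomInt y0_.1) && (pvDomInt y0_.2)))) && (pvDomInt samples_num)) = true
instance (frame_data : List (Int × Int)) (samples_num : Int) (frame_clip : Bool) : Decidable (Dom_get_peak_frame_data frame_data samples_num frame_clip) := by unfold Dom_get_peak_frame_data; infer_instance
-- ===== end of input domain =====

-- B answers each pitch's window from a sorted key array via binary search over the present keys only,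
-- instead of A's per-offset dict probing; equal return values are proved on Pre_ (A raises otherwise).

-- ===== PORT A =====
-- _clamp(n, smallest, largest) = sorted([smallest, n, largest])[1]
def pvClamp (n smallest largest : Int) : Int :=
  PySem.List.pyGetD (PySem.List.sorted [smallest, n, largest] (fun x => x)) 1 0

def get_peak_frame_data (frame_data : List (Int × Int)) (samples_num : Int) (frame_clip : Bool) : List (Int × Int) :=
  let d : PySem.Dict Int Int := PySem.Dict.ofList frame_data
  let samples_indices := PySem.List.pyRange (-(PySem.Int.floordiv samples_num 2)) (-(PySem.Int.floordiv samples_num 2) + samples_num)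
  -- 上下のピッチでならす
  let tmp := d.items.foldl (fun (acc : PySem.Dict Int Int) pv =>
      let frames := samples_indices.map (fun i => if d.contains (pv.1 + i) then d.getD (pv.1 + i) 0 else 0)
      -- max([]) raises ValueError (samples_num ≤ 0): excluded by Pre_
      let m := (PySem.List.max? frames (fun x => x)).getD 0
      acc.insert pv.1 (if frame_clip then pvClamp m 0 1 else m)) PySem.Dict.empty
  -- ピークのみ抽出
  let peak := tmp.items.foldl (fun (acc : PySem.Dict Int Int) pv =>
      let frames := samples_indices.map (fun i => if tmp.contains (pv.1 + i) then tmp.getD (pv.1 + i) 0 else 0)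
      acc.insert pv.1 (if frames.count pv.2 = frames.length then tmp.getD pv.1 0 else 0)) PySem.Dict.empty
  peak.items

-- ===== PORT B =====
def get_peak_frame_data_alt (frame_data : List (Int × Int)) (samples_num : Int) (frame_clip : Bool) : List (Int × Int) :=
  let d : PySem.Dict Int Int := PySem.Dict.ofList frame_data
  if frame_data = [] then [] else
  let lo := -(PySem.Int.floordiv samples_num 2)
  let hi := lo + samples_num
  let ks := PySem.List.sorted d.keys (fun x => x)
  let vs := ks.map (fun k => d.getD k 0)      -- frame_data[k]: k is a key, so no KeyError
  let tmp := d.keys.foldl (fun (acc : PySem.Dict Int Int) p =>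
      let l := PySem.List.bisectLeft ks (p + lo)
      let r := PySem.List.bisectLeft ks (p + hi)
      -- max([]) raises ValueError (samples_num ≤ 0): excluded by Pre_
      let m0 := (PySem.List.max? (PySem.List.slice vs (some (l : Int)) (some (r : Int))) (fun x => x)).getD 0
      let m := if (r : Int) - (l : Int) ≠ samples_num then max m0 0 else m0
      acc.insert p (if frame_clip then min 1 (max 0 m) else m)) PySem.Dict.empty
  let tvs := ks.map (fun k => tmp.getD k 0)   -- tmp[k]: k is a key of tmp, so no KeyError
  let out := d.keys.foldl (fun (acc : PySem.Dict Int Int) p =>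
      let l := PySem.List.bisectLeft ks (p + lo)
      let r := PySem.List.bisectLeft ks (p + hi)
      let seg := PySem.List.slice tvs (some (l : Int)) (some (r : Int))
      let w := tmp.getD p 0
      acc.insert p (if (PySem.List.min? seg (fun x => x)).getD 0 = (PySem.List.max? seg (fun x => x)).getD 0
                       ∧ ((r : Int) - (l : Int) = samples_num ∨ w = 0) then w else 0)) PySem.Dict.empty
  out.items

-- ===== PRECONDITION & SPEC =====
-- Pre_ excludes exactly the inputs where Python A raises: a nonempty dict with samples_num ≤ 0
-- makes A call max([]) (ValueError).
def Pre_get_peak_frame_data (frame_data : List (Int × Int)) (samples_num : Int) (frame_clip : Bool) : Prop :=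
  frame_data = [] ∨ 1 ≤ samples_num
instance (frame_data : List (Int × Int)) (samples_num : Int) (frame_clip : Bool) : Decidable (Pre_get_peak_frame_data frame_data samples_num frame_clip) := by unfold Pre_get_peak_frame_data; infer_instance

def pvWitness_get_peak_frame_data : (List (Int × Int)) × Int × Bool := ([(60, 2), (61, 2), (64, -1)], 3, false)

def Spec_get_peak_frame_data (frame_data : List (Int × Int)) (samples_num : Int) (frame_clip : Bool) (out : List (Int × Int)) : Prop := out = get_peak_frame_data_alt frame_data samples_num frame_clip
instance (frame_data : List (Int × Int)) (samples_num : Int) (frame_clip : Bool) (out : List (Int × Int)) : Decidable (Spec_get_peak_frame_data frame_data samples_num frame_clip out) := by unfold Spec_get_peak_frame_data; infer_instance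

-- ===== CLAIM (what is proved, stated in full; the proofs are below) =====
def Claim_equal_get_peak_frame_data : Prop := ∀ (frame_data : List (Int × Int)) (samples_num : Int) (frame_clip : Bool), Dom_get_peak_frame_data frame_data samples_num frame_clip → Pre_get_peak_frame_data frame_data samples_num frame_clip → Spec_get_peak_frame_data frame_data samples_num frame_clip (get_peak_frame_data frame_data samples_num frame_clip)

-- ===== LEMMAS AND PROOFS =====

-- value-function views of the two programs (proof-side only)
def pvFramesOf (u : PySem.Dict Int Int) (lo hi p : Int) : List Int :=
  (PySem.List.pyRange lo hi).map (fun i => if u.contains (p + i) then u.getD (p + i) 0 else 0)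

def pvMA (u : PySem.Dict Int Int) (lo hi p : Int) : Int :=
  (PySem.List.max? (pvFramesOf u lo hi p) (fun x => x)).getD 0

def pvVA1 (u : PySem.Dict Int Int) (lo hi : Int) (clip : Bool) (p : Int) : Int :=
  if clip then pvClamp (pvMA u lo hi p) 0 1 else pvMA u lo hi p

def pvVA2 (u : PySem.Dict Int Int) (lo hi p pw : Int) : Int :=
  if (pvFramesOf u lo hi p).count pw = (pvFramesOf u lo hi p).length then u.getD p 0 else 0

def pvVB1 (ks vs : List Int) (lo hi w : Int) (clip : Bool) (p : Int) : Int :=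
  let l := PySem.List.bisectLeft ks (p + lo)
  let r := PySem.List.bisectLeft ks (p + hi)
  let m0 := (PySem.List.max? (PySem.List.slice vs (some (l : Int)) (some (r : Int))) (fun x => x)).getD 0
  let m := if (r : Int) - (l : Int) ≠ w then max m0 0 else m0
  if clip then min 1 (max 0 m) else m

def pvVB2 (t : PySem.Dict Int Int) (ks tvs : List Int) (lo hi w p : Int) : Int :=
  let l := PySem.List.bisectLeft ks (p + lo)
  let r := PySem.List.bisectLeft ks (p + hi)
  let seg := PySem.List.slice tvs (some (l : Int)) (some (r : Int))
  let pw := t.getD p 0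
  if (PySem.List.min? seg (fun x => x)).getD 0 = (PySem.List.max? seg (fun x => x)).getD 0
      ∧ ((r : Int) - (l : Int) = w ∨ pw = 0) then pw else 0

theorem pvA_view (frame_data : List (Int × Int)) (samples_num : Int) (frame_clip : Bool) :
    get_peak_frame_data frame_data samples_num frame_clip =
      (let d : PySem.Dict Int Int := PySem.Dict.ofList frame_data
       let lo := -(PySem.Int.floordiv samples_num 2)
       let t := d.items.foldl (fun acc pv => acc.insert pv.1 (pvVA1 d lo (lo + samples_num) frame_clip pv.1)) PySem.Dict.empty
       (t.items.foldl (fun acc pv => acc.insert pv.1 (pvVA2 t lo (lo + samples_num) pv.1 pv.2)) PySem.Dict.empty).items) := rfl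

theorem pvB_view (frame_data : List (Int × Int)) (samples_num : Int) (frame_clip : Bool) (h : ¬ frame_data = []) :
    get_peak_frame_data_alt frame_data samples_num frame_clip =
      (let d : PySem.Dict Int Int := PySem.Dict.ofList frame_data
       let lo := -(PySem.Int.floordiv samples_num 2)
       let ks := PySem.List.sorted d.keys (fun x => x)
       let vs := ks.map (fun k => d.getD k 0)
       let t := d.keys.foldl (fun acc p => acc.insert p (pvVB1 ks vs lo (lo + samples_num) samples_num frame_clip p)) PySem.Dict.empty
       let tvs := ks.map (fun k => t.getD k 0)
       (d.keys.foldl (fun acc p => acc.insert p (pvVB2 t ks tvs lo (lo + samples_num) samples_num p)) PySem.Dict.empty).items) := by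
  simp only [get_peak_frame_data_alt]
  rw [if_neg h]
  rfl

def pvKseg (ks : List Int) (a b : Int) : List Int :=
  List.take (PySem.List.bisectLeft ks b - PySem.List.bisectLeft ks a) (List.drop (PySem.List.bisectLeft ks a) ks)

theorem pvBisect_le {ks : List Int} (hs : ks.Pairwise (· ≤ ·)) {a b : Int} (hab : a ≤ b) :
    PySem.List.bisectLeft ks a ≤ PySem.List.bisectLeft ks b ∧ PySem.List.bisectLeft ks b ≤ ks.length := by
  obtain ⟨hl1, hl2, hl3⟩ := PySem.List.bisectLeft_spec ks a hs
  obtain ⟨hr1, hr2, hr3⟩ := PySem.List.bisectLeft_spec ks b hs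
  refine ⟨?_, hr1⟩
  by_contra hc
  push Not at hc
  have hjlen : PySem.List.bisectLeft ks b < ks.length := lt_of_lt_of_le hc hl1
  have h1 := hl2 _ hjlen hc
  have h2 := hr3 _ hjlen (le_refl _)
  omega

theorem pvKseg_length {ks : List Int} (hs : ks.Pairwise (· ≤ ·)) {a b : Int} (hab : a ≤ b) :
    (pvKseg ks a b).length = PySem.List.bisectLeft ks b - PySem.List.bisectLeft ks a := by
  obtain ⟨h1, h2⟩ := pvBisect_le hs hab
  simp [pvKseg]
  omega

theorem pvKseg_getElem {ks : List Int} {a b : Int} {j : Nat} (hj : j < (pvKseg ks a b).length)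
    (hjlen : PySem.List.bisectLeft ks a + j < ks.length) :
    (pvKseg ks a b)[j] = ks[PySem.List.bisectLeft ks a + j] := by
  simp only [pvKseg] at hj ⊢
  rw [List.getElem_take, List.getElem_drop]

theorem pvKseg_mem {ks : List Int} (hs : ks.Pairwise (· ≤ ·)) {a b : Int} (hab : a ≤ b) (q : Int) :
    q ∈ pvKseg ks a b ↔ q ∈ ks ∧ a ≤ q ∧ q < b := by
  obtain ⟨hl1, hl2, hl3⟩ := PySem.List.bisectLeft_spec ks a hs
  obtain ⟨hr1, hr2, hr3⟩ := PySem.List.bisectLeft_spec ks b hs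
  obtain ⟨hlr, _⟩ := pvBisect_le hs hab
  have hlen : (pvKseg ks a b).length = PySem.List.bisectLeft ks b - PySem.List.bisectLeft ks a :=
    pvKseg_length hs hab
  constructor
  · intro hq
    obtain ⟨j, hj, hget⟩ := List.getElem_of_mem hq
    have hjlen : PySem.List.bisectLeft ks a + j < ks.length := by omega
    rw [pvKseg_getElem hj hjlen] at hget
    refine ⟨hget ▸ List.getElem_mem _, ?_, ?_⟩
    · have := hl3 _ hjlen (by omega); omega
    · have := hr2 _ hjlen (by omega); omega
  · rintro ⟨hmem, hge, hlt⟩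
    obtain ⟨j, hj, hget⟩ := List.getElem_of_mem hmem
    have hjl : PySem.List.bisectLeft ks a ≤ j := by
      by_contra hc
      push Not at hc
      have := hl2 j hj hc
      omega
    have hjr : j < PySem.List.bisectLeft ks b := by
      by_contra hc
      push Not at hc
      have := hr3 j hj hc
      omega
    have hj2 : j - PySem.List.bisectLeft ks a < (pvKseg ks a b).length := by omega
    have hjlen : PySem.List.bisectLeft ks a + (j - PySem.List.bisectLeft ks a) < ks.length := by omega
    rw [List.mem_iff_getElem]
    refine ⟨j - PySem.List.bisectLeft ks a, hj2, ?_⟩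
    rw [pvKseg_getElem hj2 hjlen]
    have hidx : PySem.List.bisectLeft ks a + (j - PySem.List.bisectLeft ks a) = j := by omega
    exact (getElem_congr rfl hidx hjlen).trans hget

theorem pvKseg_nodup {ks : List Int} (hnd : ks.Nodup) (a b : Int) : (pvKseg ks a b).Nodup :=
  (hnd.sublist ((List.take_sublist _ _).trans (List.drop_sublist _ _)))

theorem pvKseg_len_bound {ks : List Int} (hs : ks.Pairwise (· ≤ ·)) (hnd : ks.Nodup) {a b : Int} (hab : a ≤ b) :
    ((pvKseg ks a b).length : Int) ≤ b - a ∧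
    (((pvKseg ks a b).length : Int) = b - a ↔ ∀ q, a ≤ q → q < b → q ∈ ks) := by
  have hsub : (pvKseg ks a b).toFinset ⊆ Finset.Ico a b := by
    intro q hq
    rw [List.mem_toFinset, pvKseg_mem hs hab] at hq
    rw [Finset.mem_Ico]
    exact ⟨hq.2.1, hq.2.2⟩
  have hnds : (pvKseg ks a b).Nodup := pvKseg_nodup hnd a b
  have hcard : (pvKseg ks a b).toFinset.card = (pvKseg ks a b).length := List.toFinset_card_of_nodup hnds
  have hico : (Finset.Ico a b).card = (b - a).toNat := Int.card_Ico a b ▸ rfl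
  have hle := Finset.card_le_card hsub
  constructor
  · omega
  · constructor
    · intro heq q hq1 hq2
      have : (pvKseg ks a b).toFinset = Finset.Ico a b := by
        apply Finset.eq_of_subset_of_card_le hsub
        omega
      have : q ∈ (pvKseg ks a b).toFinset := by
        rw [this, Finset.mem_Ico]; exact ⟨hq1, hq2⟩
      rw [List.mem_toFinset, pvKseg_mem hs hab] at this
      exact this.1
    · intro hall
      have hsup : Finset.Ico a b ⊆ (pvKseg ks a b).toFinset := by
        intro q hq
        rw [Finset.mem_Ico] at hq
        rw [List.mem_toFinset, pvKseg_mem hs hab]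
        exact ⟨hall q hq.1 hq.2, hq.1, hq.2⟩
      have := Finset.card_le_card hsup
      omega

theorem pvContains_eq_mem {u : PySem.Dict Int Int} {ks : List Int} (hmem : ∀ q, q ∈ ks ↔ q ∈ u.keys)
    {q : Int} (h : q ∉ ks) : u.getD q 0 = 0 := by
  apply PySem.Dict.getD_of_not_contains
  by_contra hc
  have : u.contains q = true := by
    cases hcc : u.contains q
    · exact absurd hcc hc
    · rfl
  exact h ((hmem q).mpr ((PySem.Dict.contains_iff_mem_keys u q).mp this))

theorem pvMax_eq (u : PySem.Dict Int Int) {ks : List Int} (hs : ks.Pairwise (· ≤ ·)) (hnd : ks.Nodup)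
    (hmem : ∀ q, q ∈ ks ↔ q ∈ u.keys) {p a b : Int} (hp : p ∈ ks) (ha : a ≤ p) (hb : p < b) :
    (PySem.List.max? ((PySem.List.pyRange a b).map (fun q => u.getD q 0)) (fun x => x)).getD 0
      = (if ((PySem.List.bisectLeft ks b : Nat) : Int) - ((PySem.List.bisectLeft ks a : Nat) : Int) ≠ b - a
         then max ((PySem.List.max? ((pvKseg ks a b).map (fun q => u.getD q 0)) (fun x => x)).getD 0) 0
         else (PySem.List.max? ((pvKseg ks a b).map (fun q => u.getD q 0)) (fun x => x)).getD 0) := by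
  have hab : a ≤ b := le_trans ha (le_of_lt hb)
  have hpw : p ∈ PySem.List.pyRange a b := PySem.List.mem_pyRange_one.mpr ⟨ha, hb⟩
  have hpk : p ∈ pvKseg ks a b := (pvKseg_mem hs hab p).mpr ⟨hp, ha, hb⟩
  -- the two maxima exist
  obtain ⟨M, hM⟩ : ∃ M, PySem.List.max? ((PySem.List.pyRange a b).map (fun q => u.getD q 0)) (fun x => x) = some M := by
    cases h : PySem.List.max? ((PySem.List.pyRange a b).map (fun q => u.getD q 0)) (fun x => x) with
    | none =>
        exfalso
        have := (PySem.List.max?_eq_none_iff _ _).mp h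
        have : u.getD p 0 ∈ ((PySem.List.pyRange a b).map (fun q => u.getD q 0)) := List.mem_map_of_mem hpw
        simp_all
    | some M => exact ⟨M, rfl⟩
  obtain ⟨M0, hM0⟩ : ∃ M0, PySem.List.max? ((pvKseg ks a b).map (fun q => u.getD q 0)) (fun x => x) = some M0 := by
    cases h : PySem.List.max? ((pvKseg ks a b).map (fun q => u.getD q 0)) (fun x => x) with
    | none =>
        exfalso
        have := (PySem.List.max?_eq_none_iff _ _).mp h
        have : u.getD p 0 ∈ ((pvKseg ks a b).map (fun q => u.getD q 0)) := List.mem_map_of_mem hpk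
        simp_all
    | some M0 => exact ⟨M0, rfl⟩
  have hMmem := PySem.List.max?_mem hM
  have hMub := PySem.List.max?_isMax hM
  have hM0mem := PySem.List.max?_mem hM0
  have hM0ub := PySem.List.max?_isMax hM0
  rw [hM, hM0]
  simp only [Option.getD_some]
  -- seg elements are frame elements
  have hseg_sub : ∀ x ∈ (pvKseg ks a b).map (fun q => u.getD q 0),
      x ∈ (PySem.List.pyRange a b).map (fun q => u.getD q 0) := by
    intro x hx
    obtain ⟨q, hq, hxq⟩ := List.mem_map.mp hx
    obtain ⟨hqk, hq1, hq2⟩ := (pvKseg_mem hs hab q).mp hq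
    exact hxq ▸ List.mem_map_of_mem (PySem.List.mem_pyRange_one.mpr ⟨hq1, hq2⟩)
  have hM0leM : M0 ≤ M := hMub _ (hseg_sub _ hM0mem)
  have hlr := pvBisect_le hs hab
  have hlen := pvKseg_length hs hab
  by_cases hfull : ((PySem.List.bisectLeft ks b : Nat) : Int) - ((PySem.List.bisectLeft ks a : Nat) : Int) = b - a
  · -- every window position is a key
    rw [if_neg (by exact fun hc => hc hfull)]
    have hfull' : ∀ q, a ≤ q → q < b → q ∈ ks := by
      apply ((pvKseg_len_bound hs hnd hab).2).mp
      rw [hlen]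
      omega
    have hMleM0 : M ≤ M0 := by
      obtain ⟨q, hq, hxq⟩ := List.mem_map.mp hMmem
      obtain ⟨hq1, hq2⟩ := PySem.List.mem_pyRange_one.mp hq
      have hqk : q ∈ pvKseg ks a b := (pvKseg_mem hs hab q).mpr ⟨hfull' q hq1 hq2, hq1, hq2⟩
      exact hxq ▸ hM0ub _ (List.mem_map_of_mem hqk)
    omega
  · rw [if_pos hfull]
    have hmiss : ∃ q, a ≤ q ∧ q < b ∧ q ∉ ks := by
      by_contra hc
      push Not at hc
      have := ((pvKseg_len_bound hs hnd hab).2).mpr (fun q h1 h2 => hc q h1 h2)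
      omega
    have h0leM : 0 ≤ M := by
      obtain ⟨q, hq1, hq2, hq3⟩ := hmiss
      have : u.getD q 0 = 0 := pvContains_eq_mem hmem hq3
      have hz : (0 : Int) ∈ (PySem.List.pyRange a b).map (fun q => u.getD q 0) := by
        have hq' : u.getD q 0 ∈ (PySem.List.pyRange a b).map (fun q => u.getD q 0) :=
          List.mem_map_of_mem (PySem.List.mem_pyRange_one.mpr ⟨hq1, hq2⟩)
        rwa [this] at hq'
      exact hMub _ hz
    have hMle : M ≤ max M0 0 := by
      obtain ⟨q, hq, hxq⟩ := List.mem_map.mp hMmem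
      obtain ⟨hq1, hq2⟩ := PySem.List.mem_pyRange_one.mp hq
      by_cases hqk : q ∈ ks
      · have : M ∈ (pvKseg ks a b).map (fun q => u.getD q 0) := by
          rw [← hxq]
          exact List.mem_map_of_mem ((pvKseg_mem hs hab q).mpr ⟨hqk, hq1, hq2⟩)
        exact le_trans (hM0ub _ this) (le_max_left _ _)
      · have : u.getD q 0 = 0 := pvContains_eq_mem hmem hqk
        rw [← hxq, this]
        exact le_max_right _ _
    omega

theorem pvAllEq (u : PySem.Dict Int Int) {ks : List Int} (hs : ks.Pairwise (· ≤ ·)) (hnd : ks.Nodup)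
    (hmem : ∀ q, q ∈ ks ↔ q ∈ u.keys) {p a b : Int} (hp : p ∈ ks) (ha : a ≤ p) (hb : p < b) :
    (((PySem.List.pyRange a b).map (fun q => u.getD q 0)).count (u.getD p 0)
        = ((PySem.List.pyRange a b).map (fun q => u.getD q 0)).length)
      ↔ ((PySem.List.min? ((pvKseg ks a b).map (fun q => u.getD q 0)) (fun x => x)).getD 0
            = (PySem.List.max? ((pvKseg ks a b).map (fun q => u.getD q 0)) (fun x => x)).getD 0
          ∧ (((PySem.List.bisectLeft ks b : Nat) : Int) - ((PySem.List.bisectLeft ks a : Nat) : Int) = b - a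
             ∨ u.getD p 0 = 0)) := by
  have hab : a ≤ b := le_trans ha (le_of_lt hb)
  have hpw : p ∈ PySem.List.pyRange a b := PySem.List.mem_pyRange_one.mpr ⟨ha, hb⟩
  have hpk : p ∈ pvKseg ks a b := (pvKseg_mem hs hab p).mpr ⟨hp, ha, hb⟩
  have hw0seg : u.getD p 0 ∈ (pvKseg ks a b).map (fun q => u.getD q 0) := List.mem_map_of_mem hpk
  obtain ⟨m1, hm1⟩ : ∃ m1, PySem.List.min? ((pvKseg ks a b).map (fun q => u.getD q 0)) (fun x => x) = some m1 := by
    cases h : PySem.List.min? ((pvKseg ks a b).map (fun q => u.getD q 0)) (fun x => x) with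
    | none => exfalso; have := (PySem.List.min?_eq_none_iff _ _).mp h; simp_all
    | some m1 => exact ⟨m1, rfl⟩
  obtain ⟨m2, hm2⟩ : ∃ m2, PySem.List.max? ((pvKseg ks a b).map (fun q => u.getD q 0)) (fun x => x) = some m2 := by
    cases h : PySem.List.max? ((pvKseg ks a b).map (fun q => u.getD q 0)) (fun x => x) with
    | none => exfalso; have := (PySem.List.max?_eq_none_iff _ _).mp h; simp_all
    | some m2 => exact ⟨m2, rfl⟩
  have hm1mem := PySem.List.min?_mem hm1
  have hm1lb := PySem.List.min?_isMin hm1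
  have hm2mem := PySem.List.max?_mem hm2
  have hm2ub := PySem.List.max?_isMax hm2
  have hlr := pvBisect_le hs hab
  have hlen := pvKseg_length hs hab
  have hcast : (((pvKseg ks a b).length : Nat) : Int)
      = ((PySem.List.bisectLeft ks b : Nat) : Int) - ((PySem.List.bisectLeft ks a : Nat) : Int) := by
    rw [hlen]; omega
  have hFullIff : (((PySem.List.bisectLeft ks b : Nat) : Int) - ((PySem.List.bisectLeft ks a : Nat) : Int) = b - a)
      ↔ ∀ q, a ≤ q → q < b → q ∈ ks := hcast ▸ (pvKseg_len_bound hs hnd hab).2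
  have hseg_sub : ∀ x ∈ (pvKseg ks a b).map (fun q => u.getD q 0),
      x ∈ (PySem.List.pyRange a b).map (fun q => u.getD q 0) := by
    intro x hx
    obtain ⟨q, hq, hxq⟩ := List.mem_map.mp hx
    obtain ⟨hqk, hq1, hq2⟩ := (pvKseg_mem hs hab q).mp hq
    exact hxq ▸ List.mem_map_of_mem (PySem.List.mem_pyRange_one.mpr ⟨hq1, hq2⟩)
  rw [List.count_eq_length, hm1, hm2]
  simp only [Option.getD_some]
  constructor
  · intro Hall
    have h1 : m1 = u.getD p 0 := (Hall _ (hseg_sub _ hm1mem)).symm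
    have h2 : m2 = u.getD p 0 := (Hall _ (hseg_sub _ hm2mem)).symm
    refine ⟨by rw [h1, h2], ?_⟩
    by_cases hfull : ((PySem.List.bisectLeft ks b : Nat) : Int) - ((PySem.List.bisectLeft ks a : Nat) : Int) = b - a
    · exact Or.inl hfull
    · right
      have hmiss : ∃ q, a ≤ q ∧ q < b ∧ q ∉ ks := by
        by_contra hc
        push Not at hc
        exact hfull (hFullIff.mpr (fun q h1 h2 => hc q h1 h2))
      obtain ⟨q, hq1, hq2, hq3⟩ := hmiss
      have hz : u.getD q 0 = 0 := pvContains_eq_mem hmem hq3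
      have hh := Hall _ (List.mem_map_of_mem (f := fun q => u.getD q 0) (PySem.List.mem_pyRange_one.mpr ⟨hq1, hq2⟩))
      simp only at hh
      rw [hz] at hh
      exact hh
  · rintro ⟨h12, hP⟩
    have hw0m : m1 ≤ u.getD p 0 ∧ u.getD p 0 ≤ m2 := ⟨hm1lb _ hw0seg, hm2ub _ hw0seg⟩
    intro x hx
    obtain ⟨q, hq, hxq⟩ := List.mem_map.mp hx
    obtain ⟨hq1, hq2⟩ := PySem.List.mem_pyRange_one.mp hq
    by_cases hqk : q ∈ ks
    · have hxseg : x ∈ (pvKseg ks a b).map (fun q => u.getD q 0) := by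
        rw [← hxq]
        exact List.mem_map_of_mem ((pvKseg_mem hs hab q).mpr ⟨hqk, hq1, hq2⟩)
      have := hm1lb _ hxseg
      have := hm2ub _ hxseg
      omega
    · have hz : x = 0 := by
        rw [← hxq]
        exact pvContains_eq_mem hmem hqk
      rcases hP with hfull | hw0
      · exact absurd (hFullIff.mp hfull q hq1 hq2) hqk
      · rw [hw0, hz]


theorem pvClamp_eq (m : Int) : pvClamp m 0 1 = min 1 (max 0 m) := by
  simp only [pvClamp]
  rcases (by omega : m < 0 ∨ m = 0 ∨ m = 1 ∨ 1 < m) with h | h | h | h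
  · simp [PySem.List.sorted, PySem.List.insertBy, PySem.List.pyGetD, PySem.List.pyGet?, PySem.List.pyIdx?, h, show ¬ (1 < m) by omega]
    omega
  · subst h; decide
  · subst h; decide
  · simp [PySem.List.sorted, PySem.List.insertBy, PySem.List.pyGetD, PySem.List.pyGet?, PySem.List.pyIdx?, h, show ¬ (m < 0) by omega]
    omega

theorem pvFrames_shift (F : Int → Int) (p lo hi : Int) :
    (PySem.List.pyRange lo hi).map (fun i => F (p + i)) = (PySem.List.pyRange (p + lo) (p + hi)).map F := by
  rw [PySem.List.pyRange_one, PySem.List.pyRange_one]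
  simp only [List.map_map]
  have h2 : (p + hi - (p + lo)) = hi - lo := by ring
  rw [h2]
  apply List.map_congr_left
  intro k _
  simp only [Function.comp]
  ring_nf

theorem pvSlice_map (f : Int → Int) (ks : List Int) (a b : Int) :
    PySem.List.slice (ks.map f) (some ((PySem.List.bisectLeft ks a : Nat) : Int)) (some ((PySem.List.bisectLeft ks b : Nat) : Int))
      = (pvKseg ks a b).map f := by
  simp only [pvKseg]
  rw [PySem.List.slice_natCast]
  rw [List.map_take, List.map_drop]

theorem pvIf_contains (u : PySem.Dict Int Int) (q : Int) :
    (if u.contains q then u.getD q 0 else 0) = u.getD q 0 := by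
  cases hc : u.contains q
  · simp [PySem.Dict.getD_of_not_contains u 0 hc]
  · simp

theorem pvKey1 (u : PySem.Dict Int Int) {ks : List Int} (hs : ks.Pairwise (· ≤ ·)) (hnd : ks.Nodup)
    (hmem : ∀ q, q ∈ ks ↔ q ∈ u.keys) {p lo hi w : Int} (hp : p ∈ ks) (hlo : lo ≤ 0) (hhi : 0 < hi)
    (hw : hi - lo = w) (clip : Bool) :
    pvVA1 u lo hi clip p = pvVB1 ks (ks.map (fun k => u.getD k 0)) lo hi w clip p := by
  have hMA : pvMA u lo hi p =
      (let l := PySem.List.bisectLeft ks (p + lo)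
       let r := PySem.List.bisectLeft ks (p + hi)
       let m0 := (PySem.List.max? (PySem.List.slice (ks.map (fun k => u.getD k 0)) (some (l : Int)) (some (r : Int))) (fun x => x)).getD 0
       if (r : Int) - (l : Int) ≠ w then max m0 0 else m0) := by
    simp only [pvMA, pvFramesOf]
    have hIf : (fun i => if u.contains (p + i) then u.getD (p + i) 0 else 0)
        = (fun i => u.getD (p + i) 0) := funext fun i => pvIf_contains u (p + i)
    rw [hIf, pvFrames_shift (fun q => u.getD q 0) p lo hi]
    rw [pvMax_eq u hs hnd hmem hp (by omega) (by omega)]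
    rw [pvSlice_map (fun k => u.getD k 0) ks (p + lo) (p + hi)]
    have hwb : p + hi - (p + lo) = w := by omega
    rw [hwb]
  simp only [pvVA1, pvVB1, hMA]
  cases clip
  · simp
  · simp [pvClamp_eq]

theorem pvKey2 (u : PySem.Dict Int Int) {ks : List Int} (hs : ks.Pairwise (· ≤ ·)) (hnd : ks.Nodup)
    (hmem : ∀ q, q ∈ ks ↔ q ∈ u.keys) {p lo hi w : Int} (hp : p ∈ ks) (hlo : lo ≤ 0) (hhi : 0 < hi)
    (hw : hi - lo = w) :
    pvVA2 u lo hi p (u.getD p 0) = pvVB2 u ks (ks.map (fun k => u.getD k 0)) lo hi w p := by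
  simp only [pvVA2, pvVB2, pvFramesOf]
  have hIf : (fun i => if u.contains (p + i) then u.getD (p + i) 0 else 0)
      = (fun i => u.getD (p + i) 0) := funext fun i => pvIf_contains u (p + i)
  simp only [hIf, pvFrames_shift (fun q => u.getD q 0) p lo hi,
    pvSlice_map (fun k => u.getD k 0) ks (p + lo) (p + hi)]
  have hiff := pvAllEq u hs hnd hmem hp (by omega : p + lo ≤ p) (by omega : p < p + hi)
  have hwb : p + hi - (p + lo) = w := by omega
  rw [hwb] at hiff
  exact if_congr (by rw [hiff]) rfl rfl

-- window bounds from samples_num ≥ 1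
theorem pvWindow_bounds {w : Int} (hw : 1 ≤ w) :
    -(PySem.Int.floordiv w 2) ≤ 0 ∧ 0 < -(PySem.Int.floordiv w 2) + w := by
  rw [PySem.Int.floordiv_eq_ediv_of_pos (by norm_num : (0:Int) < 2)]
  omega

-- ===== VERDICT (by name: the statement is the Claim_ definition above) =====
theorem get_peak_frame_data_spec : Claim_equal_get_peak_frame_data := by
  intro frame_data samples_num frame_clip hdom hpre
  unfold Spec_get_peak_frame_data
  by_cases hfd : frame_data = []
  · subst hfd; rfl
  · have hw : 1 ≤ samples_num := hpre.resolve_left hfd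
    rw [pvA_view, pvB_view frame_data samples_num frame_clip hfd]
    simp only []
    obtain ⟨hb1, hb2⟩ := pvWindow_bounds hw
    set d : PySem.Dict Int Int := PySem.Dict.ofList frame_data with hd
    set lo : Int := -(PySem.Int.floordiv samples_num 2) with hlo
    set hi : Int := lo + samples_num with hhi
    set ks : List Int := PySem.List.sorted d.keys (fun x => x) with hks
    set vs : List Int := ks.map (fun k => d.getD k 0) with hvs
    have hndd : d.keys.Nodup := PySem.Dict.nodup_keys_ofList frame_data
    have hperm : ks.Perm d.keys := PySem.List.sorted_perm d.keys (fun x => x) false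
    have hsorted : ks.Pairwise (· ≤ ·) := PySem.List.sorted_pairwise d.keys (fun x => x)
    have hndks : ks.Nodup := (hperm.nodup_iff).mpr hndd
    have hmemks : ∀ q, q ∈ ks ↔ q ∈ d.keys := fun q => hperm.mem_iff
    have hA1 : d.items.foldl (fun acc pv => acc.insert pv.1 (pvVA1 d lo hi frame_clip pv.1)) PySem.Dict.empty
             = d.keys.foldl (fun acc k => acc.insert k (pvVB1 ks vs lo hi samples_num frame_clip k)) PySem.Dict.empty := by
      rw [PySem.Dict.items_eq_map_keys d hndd 0, List.foldl_map]
      exact PySem.List.foldl_congr_mem _ _ _ _ (fun acc k hk =>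
        congrArg (fun v => acc.insert k v)
          (pvKey1 d hsorted hndks hmemks ((hmemks k).mpr hk) hb1 (by omega) (by omega) frame_clip))
    rw [hA1]
    set t : PySem.Dict Int Int := d.keys.foldl (fun acc k => acc.insert k (pvVB1 ks vs lo hi samples_num frame_clip k)) PySem.Dict.empty with ht
    set tvs : List Int := ks.map (fun k => t.getD k 0) with htvs
    have titems : t.items = d.keys.map (fun k => (k, pvVB1 ks vs lo hi samples_num frame_clip k)) := by
      have h := PySem.Dict.items_foldl_insert_fresh d.keys (fun a => a)
        (fun a => pvVB1 ks vs lo hi samples_num frame_clip a) PySem.Dict.empty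
        (fun a _ => PySem.Dict.contains_empty a) (by simpa using hndd)
      simpa using h
    have tkeys : t.keys = d.keys := by
      show t.items.map Prod.fst = d.keys
      rw [titems, List.map_map]
      have hcomp : (Prod.fst ∘ fun k => (k, pvVB1 ks vs lo hi samples_num frame_clip k)) = fun (k : Int) => k :=
        funext fun k => rfl
      rw [hcomp]
      simp
    have tnd : t.keys.Nodup := tkeys ▸ hndd
    have tget : ∀ k ∈ d.keys, t.getD k 0 = pvVB1 ks vs lo hi samples_num frame_clip k := by
      intro k hk
      apply PySem.Dict.getD_of_mem_items t _ tnd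
      rw [titems]
      exact List.mem_map_of_mem hk
    have hmem2 : ∀ q, q ∈ ks ↔ q ∈ t.keys := fun q => tkeys ▸ hmemks q
    have hA2 : t.items.foldl (fun acc pv => acc.insert pv.1 (pvVA2 t lo hi pv.1 pv.2)) PySem.Dict.empty
             = d.keys.foldl (fun acc p => acc.insert p (pvVB2 t ks tvs lo hi samples_num p)) PySem.Dict.empty := by
      rw [titems, List.foldl_map]
      refine PySem.List.foldl_congr_mem _ _ _ _ (fun acc k hk => ?_)
      have h1 : pvVA2 t lo hi k (pvVB1 ks vs lo hi samples_num frame_clip k) = pvVA2 t lo hi k (t.getD k 0) := by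
        rw [tget k hk]
      have h2 := pvKey2 t hsorted hndks hmem2 ((hmemks k).mpr hk) hb1 (by omega) (by omega : hi - lo = samples_num)
      exact congrArg (fun v => acc.insert k v) (h1.trans h2)
    rw [hA2]
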